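-- pv_equiv track=rewrite | github.com/Runarok/GeeksForGeeks-solutions | Difficulty: Hard/Let's Play!!!/lets-play.py | isSuperSimilar
-- ===== SOURCE A (Python) =====
-- def isSuperSimilar(n, m, mat, x):
--     # Create a deep copy of the input matrix to manipulate
--     li = []
--     for lis in mat:
--         li.append(lis[:])
--
--     r = 0
--     i = x % m  # Calculate the shift amount within the bounds of column size (m)
--
--     # Iterate through each row in the matrix
--     while r < n:
--         if r % 2 == 0:
--             # For even-indexed rows, shift elements to the right
--             li[r] = li[r][i:] + li[r][:i]
--         else:
--             # For odd-indexed rows, shift elements to the left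
--             li[r] = li[r][-i:] + li[r][:-i]
--         r += 1
--
--     # Compare the original matrix with the modified one and return 1 if they are equal, else 0
--     return int(mat == li)
-- ===== SOURCE B (Python) =====
-- def isSuperSimilar(n, m, mat, x):
--     # A left-rotation-by-i fixes a row iff the corresponding right-rotation does,
--     # so one slice check per row suffices: no deep copy, no parity branch.
--     i = x % m
--     return int(all(mat[r][i:] + mat[r][:i] == mat[r] for r in range(n)))
-- ===== Notes on version B (the rewrite author's own statement) =====
-- stated objective: simpler
-- what changed: Drops A's deep copy, row-rewriting while-loop and even/odd parity branch: since a row is fixed by a right rotation iff by the matching left rotation, B checks each of the first n rows against a single slice rotation with all().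
import Mathlib
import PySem

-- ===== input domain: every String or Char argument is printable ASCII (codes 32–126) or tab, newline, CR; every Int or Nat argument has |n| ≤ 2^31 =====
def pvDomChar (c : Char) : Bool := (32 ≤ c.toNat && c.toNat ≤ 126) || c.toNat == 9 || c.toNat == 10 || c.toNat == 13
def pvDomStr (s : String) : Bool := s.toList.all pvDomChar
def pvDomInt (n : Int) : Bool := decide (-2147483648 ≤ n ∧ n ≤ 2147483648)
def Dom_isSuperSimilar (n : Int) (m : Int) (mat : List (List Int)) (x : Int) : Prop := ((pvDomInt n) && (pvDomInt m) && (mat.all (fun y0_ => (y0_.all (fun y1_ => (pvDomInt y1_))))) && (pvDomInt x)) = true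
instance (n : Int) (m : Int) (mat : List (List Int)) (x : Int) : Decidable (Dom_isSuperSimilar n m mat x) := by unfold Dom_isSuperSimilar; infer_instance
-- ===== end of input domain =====

-- B drops A's deep copy, row-rewriting while-loop and even/odd parity branch: one slice-rotation
-- check per row via all(), since a row is fixed by a right rotation iff by the matching left one.


-- ===== PORT A =====
-- 'li = []; for lis in mat: li.append(lis[:])'
def pvCopyA (mat : List (List Int)) : List (List Int) :=
  mat.foldl (fun acc lis => acc ++ [PySem.List.slice lis none none]) []

-- the body of one while-iteration: the parity branch on r
def pvShiftA (i : Int) (r : Nat) (row : List Int) : List Int :=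
  if r % 2 == 0 then
    PySem.List.slice row (some i) none ++ PySem.List.slice row none (some i)
  else
    PySem.List.slice row (some (-i)) none ++ PySem.List.slice row none (some (-i))

-- 'while r < n: … r += 1' (fuel = remaining iterations; li[r] read/write made total with
-- getD/set — exact under Pre_, which puts every visited index in range)
def pvLoopA (i : Int) : Nat → Nat → List (List Int) → List (List Int)
  | 0, _, li => li
  | fuel+1, r, li => pvLoopA i fuel (r+1) (li.set r (pvShiftA i r (li.getD r [])))

def isSuperSimilar (n : Int) (m : Int) (mat : List (List Int)) (x : Int) : Int :=
  let li := pvCopyA mat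
  let i := PySem.Int.mod x m
  let li2 := pvLoopA i n.toNat 0 li
  if mat = li2 then 1 else 0

-- ===== PORT B =====
def isSuperSimilar_alt (n : Int) (m : Int) (mat : List (List Int)) (x : Int) : Int :=
  let i := PySem.Int.mod x m
  if (List.range n.toNat).all (fun r =>
      PySem.List.slice (mat.getD r []) (some i) none ++
        PySem.List.slice (mat.getD r []) none (some i) == mat.getD r [])
  then 1 else 0

-- ===== PRECONDITION & SPEC =====
-- Pre_ excludes exactly where Python A raises: m = 0 (ZeroDivisionError in x % m) and
-- n > len(mat) (IndexError at li[r]).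
def Pre_isSuperSimilar (n : Int) (m : Int) (mat : List (List Int)) (x : Int) : Prop :=
  m ≠ 0 ∧ n ≤ (mat.length : Int)
instance (n : Int) (m : Int) (mat : List (List Int)) (x : Int) : Decidable (Pre_isSuperSimilar n m mat x) := by unfold Pre_isSuperSimilar; infer_instance

def pvWitness_isSuperSimilar : Int × Int × List (List Int) × Int := (2, 2, [[1, 2], [3, 4]], 1)

def Spec_isSuperSimilar (n : Int) (m : Int) (mat : List (List Int)) (x : Int) (out : Int) : Prop := out = isSuperSimilar_alt n m mat x
instance (n : Int) (m : Int) (mat : List (List Int)) (x : Int) (out : Int) : Decidable (Spec_isSuperSimilar n m mat x out) := by unfold Spec_isSuperSimilar; infer_instance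

-- ===== CLAIM (what is proved, stated in full; the proofs are below) =====
def Claim_equal_isSuperSimilar : Prop := ∀ (n : Int) (m : Int) (mat : List (List Int)) (x : Int), Dom_isSuperSimilar n m mat x → Pre_isSuperSimilar n m mat x → Spec_isSuperSimilar n m mat x (isSuperSimilar n m mat x)

-- ===== LEMMAS AND PROOFS =====

lemma pvCopyA_eq (mat : List (List Int)) : pvCopyA mat = mat := by
  simp only [pvCopyA, PySem.List.foldl_append_singleton_eq_map, PySem.List.slice_none_none]
  exact List.map_id mat

-- a list is fixed by rotation-by-k iff fixed by the inverse rotation-by-(length-k)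
lemma rotfix (l : List Int) (k : Nat) (hk : k ≤ l.length) :
    (l.drop k ++ l.take k = l) ↔ (l.drop (l.length - k) ++ l.take (l.length - k) = l) := by
  rw [← List.rotate_eq_drop_append_take hk,
      ← List.rotate_eq_drop_append_take (Nat.sub_le _ _)]
  constructor
  · intro h
    calc l.rotate (l.length - k) = (l.rotate k).rotate (l.length - k) := by rw [h]
      _ = l.rotate (k + (l.length - k)) := List.rotate_rotate ..
      _ = l.rotate l.length := by rw [Nat.add_sub_cancel' hk]
      _ = l := List.rotate_length l
  · intro h
    calc l.rotate k = (l.rotate (l.length - k)).rotate k := by rw [h]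
      _ = l.rotate (l.length - k + k) := List.rotate_rotate ..
      _ = l.rotate l.length := by rw [Nat.sub_add_cancel hk]
      _ = l := List.rotate_length l

lemma gfix (l : List Int) (k : Nat) :
    (l.drop (l.length - k) ++ l.take (l.length - k) = l) ↔ (l.drop k ++ l.take k = l) := by
  by_cases hk : k ≤ l.length
  · exact (rotfix l k hk).symm
  · have h1 : l.length - k = 0 := by omega
    have h2 : l.drop k = [] := List.drop_eq_nil_of_le (by omega)
    have h3 : l.take k = l := List.take_of_length_le (by omega)
    simp [h1, h2, h3]

-- both slice pairs as drop/take of a clamped Nat shift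
lemma slicePair_eq (i : Int) (l : List Int) :
    PySem.List.slice l (some i) none ++ PySem.List.slice l none (some i)
      = if 0 ≤ i then l.drop i.toNat ++ l.take i.toNat
        else l.drop (l.length - (-i).toNat) ++ l.take (l.length - (-i).toNat) := by
  split
  · next h => rw [PySem.List.slice_from _ h, PySem.List.slice_to _ h]
  · next h =>
    have hk : 0 < (-i).toNat := by omega
    have hi : i = -(((-i).toNat : Int)) := by omega
    conv_lhs => rw [hi]
    rw [PySem.List.slice_from_neg_natCast l _ hk, PySem.List.slice_to_neg_natCast l _ hk]

-- a row is fixed by A's odd-row (right) rotation iff by B's (left) rotation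
lemma oddFix (i : Int) (l : List Int) :
    (PySem.List.slice l (some (-i)) none ++ PySem.List.slice l none (some (-i)) = l) ↔
    (PySem.List.slice l (some i) none ++ PySem.List.slice l none (some i) = l) := by
  rw [slicePair_eq, slicePair_eq]
  rcases lt_trichotomy i 0 with h | h | h
  · rw [if_pos (by omega : (0:Int) ≤ -i), if_neg (by omega : ¬ (0:Int) ≤ i)]
    exact (gfix l (-i).toNat).symm
  · subst h; simp
  · rw [if_neg (by omega : ¬ (0:Int) ≤ -i), if_pos (by omega : (0:Int) ≤ i), neg_neg]
    exact gfix l i.toNat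

lemma shift_fix (i : Int) (j : Nat) (l : List Int) :
    (l = pvShiftA i j l) ↔
    (PySem.List.slice l (some i) none ++ PySem.List.slice l none (some i) = l) := by
  unfold pvShiftA
  split
  · exact eq_comm
  · rw [eq_comm]; exact oddFix i l

lemma loopA_getElem? (i : Int) : ∀ (fuel r : Nat) (li : List (List Int)) (j : Nat),
    (pvLoopA i fuel r li)[j]? =
      if r ≤ j ∧ j < r + fuel then (li[j]?).map (pvShiftA i j) else li[j]? := by
  intro fuel
  induction fuel with
  | zero =>
    intro r li j
    rw [pvLoopA, if_neg (by omega)]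
  | succ fuel ih =>
    intro r li j
    rw [pvLoopA, ih]
    by_cases hjr : j = r
    · subst hjr
      rw [if_neg (by omega), if_pos (by omega), List.getElem?_set, if_pos rfl]
      by_cases hlen : j < li.length
      · rw [if_pos hlen, List.getElem?_eq_getElem hlen, Option.map_some,
            List.getD_eq_getElem li [] hlen]
      · rw [if_neg hlen, List.getElem?_eq_none_iff.mpr (by omega)]
        rfl
    · have hset : (li.set r (pvShiftA i r (li.getD r [])))[j]? = li[j]? := by
        rw [List.getElem?_set, if_neg (show ¬ r = j from fun h => hjr h.symm)]
      rw [hset]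
      by_cases hj : r + 1 ≤ j ∧ j < r + 1 + fuel
      · rw [if_pos hj, if_pos (by omega)]
      · rw [if_neg hj, if_neg (by omega)]

-- ===== VERDICT (by name: the statement is the Claim_ definition above) =====
theorem isSuperSimilar_spec : Claim_equal_isSuperSimilar := by
  intro n m mat x _hdom hpre
  obtain ⟨_hm, hn⟩ := hpre
  have hlen : n.toNat ≤ mat.length := by omega
  unfold Spec_isSuperSimilar isSuperSimilar isSuperSimilar_alt
  rw [pvCopyA_eq]
  set i := PySem.Int.mod x m with hi
  have key : (mat = pvLoopA i n.toNat 0 mat) ↔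
      (∀ j < n.toNat,
        PySem.List.slice (mat.getD j []) (some i) none ++
          PySem.List.slice (mat.getD j []) none (some i) = mat.getD j []) := by
    constructor
    · intro h j hj
      have hjlen : j < mat.length := lt_of_lt_of_le hj hlen
      have hgl := congrArg (fun l => l[j]?) h
      simp only at hgl
      rw [loopA_getElem?, if_pos (by omega), List.getElem?_eq_getElem hjlen,
          Option.map_some, Option.some.injEq] at hgl
      rw [List.getD_eq_getElem mat [] hjlen]
      exact (shift_fix i j mat[j]).mp hgl
    · intro h
      apply List.ext_getElem?
      intro j
      rw [loopA_getElem?]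
      by_cases hj : j < n.toNat
      · have hjlen : j < mat.length := lt_of_lt_of_le hj hlen
        rw [if_pos (by omega), List.getElem?_eq_getElem hjlen, Option.map_some]
        have := (shift_fix i j mat[j]).mpr (by
          have := h j hj
          rwa [List.getD_eq_getElem mat [] hjlen] at this)
        exact congrArg some this
      · rw [if_neg (by omega)]
  have keyB : ((List.range n.toNat).all (fun r =>
      PySem.List.slice (mat.getD r []) (some i) none ++
        PySem.List.slice (mat.getD r []) none (some i) == mat.getD r []) = true) ↔
      (∀ j < n.toNat,
        PySem.List.slice (mat.getD j []) (some i) none ++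
          PySem.List.slice (mat.getD j []) none (some i) = mat.getD j []) := by
    simp [List.all_eq_true, List.mem_range]
  by_cases hA : mat = pvLoopA i n.toNat 0 mat
  · rw [if_pos hA, if_pos (keyB.mpr (key.mp hA))]
  · rw [if_neg hA, if_neg (fun hb => hA (key.mpr (keyB.mp hb)))]
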